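-- pv_equiv track=rewrite | github.com/rcastano/cpachecker-1 | scripts/table-generator.py | getDateRow
-- ===== SOURCE A (Python) =====
-- def getDateRow(listOfTests, testWidths):
--     '''
--     get dateRow, each cell of it spans over all tests with this date
--     '''
--
--     dateRow = '<tr><td>Date of run</td>'
--     dateWidth = 0
--     date = listOfTests[0].get('date')
--
--     for result, width in zip(listOfTests, testWidths):
--         newDate = result.get('date')
--         if newDate != date:
--             dateRow += '<td colspan="{0}">{1}</td>'.format(dateWidth, date)
--             dateWidth = 0
--             date = newDate
--         dateWidth += width
--     dateRow += '<td colspan="{0}">{1}</td></tr>'.format(dateWidth, date)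
--
--     return dateRow
-- ===== SOURCE B (Python) =====
-- def getDateRow(listOfTests, testWidths):
--     '''
--     get dateRow, each cell of it spans over all tests with this date
--     '''
--     date = listOfTests[0].get('date')
--     # explicit stack of (result, width) pairs, next pair on top
--     stack = list(zip(listOfTests, testWidths))
--     stack.reverse()
--     cells = []
--     while True:
--         # inner loop: pop one maximal run of consecutive tests sharing `date`
--         width = 0
--         while stack and stack[-1][0].get('date') == date:
--             width += stack.pop()[1]
--         cells.append('<td colspan="{0}">{1}</td>'.format(width, date))
--         if not stack:
--             break
--         date = stack[-1][0].get('date')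
--     return '<tr><td>Date of run</td>' + ''.join(cells) + '</tr>'
-- ===== Notes on version B (the rewrite author's own statement) =====
-- stated objective: alternative
-- what changed: B consumes the zipped pairs run by run with a nested loop over an explicit stack - the inner while pops one maximal same-date run and sums its widths, the outer loop emits one cell per run into a list joined at the end - instead of A's flat single pass with a change-detection flag, carried accumulator and incremental string concatenation.
import Mathlib
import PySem

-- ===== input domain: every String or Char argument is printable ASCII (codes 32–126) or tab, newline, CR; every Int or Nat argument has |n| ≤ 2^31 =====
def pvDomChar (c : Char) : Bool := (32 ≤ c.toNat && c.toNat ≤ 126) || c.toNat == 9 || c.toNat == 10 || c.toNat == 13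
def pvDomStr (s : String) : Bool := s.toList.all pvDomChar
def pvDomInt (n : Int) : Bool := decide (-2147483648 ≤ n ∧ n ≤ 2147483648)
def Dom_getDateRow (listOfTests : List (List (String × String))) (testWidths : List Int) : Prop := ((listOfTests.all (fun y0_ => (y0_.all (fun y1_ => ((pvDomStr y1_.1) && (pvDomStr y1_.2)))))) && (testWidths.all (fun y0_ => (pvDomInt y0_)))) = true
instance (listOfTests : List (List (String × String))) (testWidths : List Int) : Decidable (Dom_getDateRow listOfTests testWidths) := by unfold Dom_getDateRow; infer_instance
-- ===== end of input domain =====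

-- B consumes the zipped pairs run by run with a nested loop over an explicit stack,
-- joining the collected cells at the end, instead of A's flat change-detection pass.

-- shared helpers: Python's result.get('date') (first match) and the cell template
def pvGetDate (r : List (String × String)) : Option String :=
  (r.find? (fun p => p.1 == "date")).map Prod.snd

def pvShowDate : Option String → String
  | none => "None"
  | some s => s

def pvCell (w : Int) (d : Option String) : String :=
  "<td colspan=\"" ++ PySem.Int.toStr w ++ "\">" ++ pvShowDate d ++ "</td>"

-- ===== PORT A =====
def pvStepA (st : String × Int × Option String) (rw : List (String × String) × Int) :
    String × Int × Option String :=
  let newDate := pvGetDate rw.1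
  if newDate ≠ st.2.2 then
    (st.1 ++ pvCell st.2.1 st.2.2, (0 : Int) + rw.2, newDate)
  else
    (st.1, st.2.1 + rw.2, newDate)

def getDateRow (listOfTests : List (List (String × String))) (testWidths : List Int) : String :=
  match listOfTests with
  | [] => ""   -- listOfTests[0] raises IndexError here; excluded by Pre_getDateRow
  | first :: _ =>
    let st := (List.zip listOfTests testWidths).foldl pvStepA
      ("<tr><td>Date of run</td>", (0 : Int), pvGetDate first)
    st.1 ++ pvCell st.2.1 st.2.2 ++ "</tr>"

-- ===== PORT B =====
-- Source B reverses the zipped list so that pop() yields the pairs in original order;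
-- the port keeps the stack as a Lean list whose HEAD is the top of that stack, so
-- the inner while-loop (pop while the date matches, summing widths) is pvInnerB.
def pvInnerB (d : Option String) (w : Int) :
    List (List (String × String) × Int) → Int × List (List (String × String) × Int)
  | [] => (w, [])
  | (r, x) :: t => if pvGetDate r == d then pvInnerB d (w + x) t else (w, (r, x) :: t)

-- the outer `while True` loop, with fuel (stack length + 1 suffices)
def pvOuterB : Nat → Option String → List (List (String × String) × Int) → List String
  | 0, _, _ => []
  | f + 1, d, stack =>
    let p := pvInnerB d 0 stack
    let c := pvCell p.1 d
    match p.2 with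
    | [] => [c]
    | (r, _) :: _ => c :: pvOuterB f (pvGetDate r) p.2

def getDateRow_alt (listOfTests : List (List (String × String))) (testWidths : List Int) : String :=
  match listOfTests with
  | [] => ""   -- listOfTests[0] raises IndexError here; excluded by Pre_getDateRow
  | first :: _ =>
    let stack := List.zip listOfTests testWidths
    "<tr><td>Date of run</td>" ++
      String.join (pvOuterB (stack.length + 1) (pvGetDate first) stack) ++ "</tr>"

-- ===== PRECONDITION & SPEC =====
-- Pre_ excludes only the empty listOfTests, on which A raises IndexError at listOfTests[0].
def Pre_getDateRow (listOfTests : List (List (String × String))) (testWidths : List Int) : Prop :=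
  listOfTests ≠ []
instance (listOfTests : List (List (String × String))) (testWidths : List Int) : Decidable (Pre_getDateRow listOfTests testWidths) := by unfold Pre_getDateRow; infer_instance

def pvWitness_getDateRow : (List (List (String × String))) × List Int :=
  ([[("date", "2024-01-01")], [("date", "2024-01-02")]], [1, 2])

def Spec_getDateRow (listOfTests : List (List (String × String))) (testWidths : List Int) (out : String) : Prop := out = getDateRow_alt listOfTests testWidths
instance (listOfTests : List (List (String × String))) (testWidths : List Int) (out : String) : Decidable (Spec_getDateRow listOfTests testWidths out) := by unfold Spec_getDateRow; infer_instance

-- ===== CLAIM =====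
def Claim_equal_getDateRow : Prop := ∀ (listOfTests : List (List (String × String))) (testWidths : List Int), Dom_getDateRow listOfTests testWidths → Pre_getDateRow listOfTests testWidths → Spec_getDateRow listOfTests testWidths (getDateRow listOfTests testWidths)

-- ===== LEMMAS AND PROOFS =====

-- common characterisation: the cell string produced from open run (d, w) over l
def pvChunk : Option String → Int → List (List (String × String) × Int) → String
  | d, w, [] => pvCell w d
  | d, w, (r, x) :: t =>
    if pvGetDate r ≠ d then pvCell w d ++ pvChunk (pvGetDate r) x t
    else pvChunk d (w + x) t

-- A's fold = pvChunk
theorem pv_foldA (l : List (List (String × String) × Int)) :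
    ∀ (s : String) (w : Int) (d : Option String),
    (let st := l.foldl pvStepA (s, w, d); st.1 ++ pvCell st.2.1 st.2.2)
      = s ++ pvChunk d w l := by
  induction l with
  | nil => intro s w d; simp [pvChunk]
  | cons hd tl ih =>
    intro s w d
    by_cases h : pvGetDate hd.1 ≠ d
    · simp only [List.foldl_cons, pvStepA, pvChunk, if_pos h]
      rw [ih]
      simp [String.append_assoc, zero_add]
    · simp only [List.foldl_cons, pvStepA, pvChunk, if_neg h]
      have h' : pvGetDate hd.1 = d := by by_contra hne; exact h hne
      rw [h', ih]

-- the string rendered after pvInnerB stops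
def pvTail : List (List (String × String) × Int) → String
  | [] => ""
  | (r, x) :: t => pvChunk (pvGetDate r) x t

-- pvChunk splits at the end of the current run
theorem pv_join_split (L : List String) :
    ∀ (a b : String), L.foldl (· ++ ·) (a ++ b) = a ++ L.foldl (· ++ ·) b := by
  induction L with
  | nil => intro a b; rfl
  | cons c t ih => intro a b; simp only [List.foldl_cons, String.append_assoc, ih]

theorem pv_join_cons (c : String) (L : List String) :
    String.join (c :: L) = c ++ String.join L := by
  simp only [String.join, List.foldl_cons]
  have := pv_join_split L c ""
  simpa using this

theorem pv_chunk_inner (l : List (List (String × String) × Int)) :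
    ∀ (d : Option String) (w : Int),
    pvChunk d w l = pvCell (pvInnerB d w l).1 d ++ pvTail (pvInnerB d w l).2 := by
  induction l with
  | nil => intro d w; simp [pvChunk, pvInnerB, pvTail]
  | cons hd tl ih =>
    obtain ⟨r, x⟩ := hd
    intro d w
    by_cases h : pvGetDate r = d
    · have hc : pvChunk d w ((r, x) :: tl) = pvChunk d (w + x) tl := by
        simp [pvChunk, h]
      have hi : pvInnerB d w ((r, x) :: tl) = pvInnerB d (w + x) tl := by
        simp [pvInnerB, h]
      rw [hc, hi]; exact ih d (w + x)
    · have hb : (pvGetDate r == d) = false := by simp [h]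
      simp only [pvChunk, pvInnerB, hb, if_pos h, Bool.false_eq_true, if_false, pvTail]

theorem pv_inner_len (l : List (List (String × String) × Int)) :
    ∀ (d : Option String) (w : Int), (pvInnerB d w l).2.length ≤ l.length := by
  induction l with
  | nil => intro d w; simp [pvInnerB]
  | cons hd tl ih =>
    intro d w
    by_cases h : (pvGetDate hd.1 == d) = true
    · simp only [pvInnerB, h, if_true]
      exact le_trans (ih d (w + hd.2)) (Nat.le_succ _)
    · simp [pvInnerB, h]

-- B's outer loop = pvChunk, given enough fuel and a matching head
theorem pv_outerB (f : Nat) :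
    ∀ (l : List (List (String × String) × Int)) (d : Option String),
    l.length < f →
    (∀ r x t, l = (r, x) :: t → pvGetDate r = d) →
    String.join (pvOuterB f d l) = pvChunk d 0 l := by
  induction f with
  | zero => intro l d hlt _; omega
  | succ f ih =>
    intro l d hlt hhead
    cases l with
    | nil =>
      simp [pvOuterB, pvInnerB, pvChunk, String.join]
    | cons hd tl =>
      obtain ⟨r, x⟩ := hd
      have hd0 : pvGetDate r = d := hhead r x tl rfl
      have hb : (pvGetDate r == d) = true := by simp [hd0]
      have hinner : pvInnerB d 0 ((r, x) :: tl) = pvInnerB d x tl := by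
        simp [pvInnerB, hb, zero_add]
      have hchunk : pvChunk d 0 ((r, x) :: tl)
          = pvCell (pvInnerB d x tl).1 d ++ pvTail (pvInnerB d x tl).2 := by
        rw [pv_chunk_inner]; rw [hinner]
      have hlen : (pvInnerB d x tl).2.length ≤ tl.length := pv_inner_len tl d x
      simp only [pvOuterB, hinner]
      cases hrest : (pvInnerB d x tl).2 with
      | nil =>
        rw [hchunk, hrest]
        simp [String.join, pvTail]
      | cons p rest =>
        obtain ⟨r2, x2⟩ := p
        rw [hchunk, hrest]
        have hlen2 : ((r2, x2) :: rest).length < f := by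
          have := hlen; rw [hrest] at this
          simp only [List.length_cons] at *
          omega
        have hih := ih ((r2, x2) :: rest) (pvGetDate r2) hlen2
          (by intro r' x' t' he
              injection he with h1 _
              injection h1 with hr _
              rw [← hr])
        have hch2 : pvChunk (pvGetDate r2) 0 ((r2, x2) :: rest)
            = pvChunk (pvGetDate r2) x2 rest := by
          simp [pvChunk, zero_add]
        rw [pv_join_cons, hih, hch2]
        simp [pvTail]

-- ===== VERDICT =====
theorem getDateRow_spec : Claim_equal_getDateRow := by
  intro listOfTests testWidths _hDom hPre
  unfold Spec_getDateRow
  cases listOfTests with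
  | nil => exact absurd rfl hPre
  | cons first tail =>
    simp only [getDateRow, getDateRow_alt]
    rw [pv_foldA]
    rw [pv_outerB (List.zip (first :: tail) testWidths).length.succ
      (List.zip (first :: tail) testWidths) (pvGetDate first)
      (Nat.lt_succ_self _)
      (by
        intro r x t he
        cases testWidths with
        | nil => simp [List.zip] at he
        | cons w ws =>
          simp only [List.zip, List.zipWith] at he
          injection he with h1 _
          injection h1 with hr _
          rw [← hr])]
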